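-- pv_equiv track=rewrite | github.com/Aasthaengg/IBMdataset | Python_codes/p02720/s615753432.py | incr_lunlun
-- ===== SOURCE A (Python) =====
-- def incr_lunlun(num):
--     num[0] += 1
--     if len(num) == 1:
--         if num[0] == 10:
--             num.append(1)
--             num[0] = 0
--
--     elif num[0] > num[1] + 1 or num[0] == 10:
--         suffix = incr_lunlun(num[1:])
--         digit = max(0, suffix[0] - 1)
--         num = [digit] + list(suffix)
--
--     return num
-- ===== SOURCE B (Python) =====
-- def incr_lunlun(num):
--     num[0] += 1
--     if len(num) == 1:
--         if num[0] == 10: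
--             num.append(1)
--             num[0] = 0
--         return num
--     digits = list(num)
--     i = 0
--     while i + 1 < len(digits) and (digits[i] > digits[i + 1] + 1 or digits[i] == 10):
--         digits[i + 1] += 1
--         i += 1
--     if i == len(digits) - 1 and digits[i] == 10:
--         digits[i] = 0
--         digits.append(1)
--     for j in range(i - 1, -1, -1):
--         digits[j] = max(0, digits[j + 1] - 1)
--     return digits
-- ===== Notes on version B (the rewrite author's own statement) =====
-- stated objective: alternative
-- what changed: Replaces A's slice-and-recurse carry propagation (recursive call on num[1:] with prepend on return) by an iterative two-phase pass over one working copy: a forward scan along the chain of adjacency violations incrementing the next digit, then a backward fill of the carried positions with max(0, higher-1).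
import Mathlib
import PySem

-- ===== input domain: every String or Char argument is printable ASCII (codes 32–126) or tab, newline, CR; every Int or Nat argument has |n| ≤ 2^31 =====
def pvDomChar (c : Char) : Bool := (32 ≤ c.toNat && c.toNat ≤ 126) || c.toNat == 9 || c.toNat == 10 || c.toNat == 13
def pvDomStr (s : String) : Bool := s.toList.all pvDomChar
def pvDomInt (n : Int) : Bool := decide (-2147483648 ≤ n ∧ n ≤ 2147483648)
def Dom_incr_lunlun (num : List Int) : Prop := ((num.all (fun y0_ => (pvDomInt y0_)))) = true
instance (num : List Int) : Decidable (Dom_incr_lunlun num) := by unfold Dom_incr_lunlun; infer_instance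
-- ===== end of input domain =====

-- B replaces A's slice-and-recurse carry propagation by an iterative forward violation
-- scan plus a backward fill over one working copy (alternative decomposition, same cost);
-- both Pythons mutate only num[0] of the argument (plus the append in the length-1 case),
-- identically — the equivalence proved here is about the return value.


-- ===== PORT A =====
-- Literal transliteration of A.  'suffix[0]' is written 'suffix.headD 0': the recursive
-- call always returns a non-empty list, so Python never raises there.
def incr_lunlun (num : List Int) : List Int :=
  match num with
  | [] => []                -- num[0] += 1 raises IndexError; excluded by Pre_
  | [a] =>
      let a := a + 1
      if a = 10 then [0, 1] else [a]
  | a :: b :: rest =>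
      let a := a + 1
      if a > b + 1 ∨ a = 10 then
        let suffix := incr_lunlun (b :: rest)
        let digit := max 0 (suffix.headD 0 - 1)
        digit :: suffix
      else a :: b :: rest

-- ===== PORT B =====
-- the while loop of Source B: advance i along the chain of adjacency violations,
-- incrementing digits[i+1] as we go
def altChain (digits : List Int) (i : Nat) : List Int × Nat :=
  if _h : i + 1 < digits.length then
    if digits.getD i 0 > digits.getD (i + 1) 0 + 1 ∨ digits.getD i 0 = 10 then
      altChain (digits.set (i + 1) (digits.getD (i + 1) 0 + 1)) (i + 1)
    else (digits, i)
  else (digits, i)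
termination_by digits.length - i
decreasing_by simp [List.length_set]; omega

-- the for loop of Source B: fill indices j-1 .. 0 back-to-front with max(0, digits[j+1]-1)
def fillBack (digits : List Int) : Nat → List Int
  | 0 => digits
  | k + 1 => fillBack (digits.set k (max 0 (digits.getD (k + 1) 0 - 1))) k

-- the tail of Source B after the while loop: the leading-digit-overflow append, then the fill
def altStep (p : List Int × Nat) : List Int :=
  let digits :=
    if p.2 = p.1.length - 1 ∧ p.1.getD p.2 0 = 10 then (p.1.set p.2 0) ++ [1] else p.1
  fillBack digits p.2

def incr_lunlun_alt (num : List Int) : List Int :=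
  match num with
  | [] => []                -- num[0] += 1 raises IndexError; excluded by Pre_
  | a :: rest =>
      if rest.isEmpty then
        if a + 1 = 10 then [0, 1] else [a + 1]
      else
        altStep (altChain ((a + 1) :: rest) 0)

-- ===== PRECONDITION & SPEC =====
-- Python A raises IndexError on the empty list (num[0] += 1); nothing else raises.
def Pre_incr_lunlun (num : List Int) : Prop := num ≠ []
instance (num : List Int) : Decidable (Pre_incr_lunlun num) := by
  unfold Pre_incr_lunlun; infer_instance

def pvWitness_incr_lunlun : List Int := [3, 4, 5]

def Spec_incr_lunlun (num : List Int) (out : List Int) : Prop := out = incr_lunlun_alt num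
instance (num : List Int) (out : List Int) : Decidable (Spec_incr_lunlun num out) := by
  unfold Spec_incr_lunlun; infer_instance

-- ===== CLAIM (what is proved, stated in full; the proofs are below) =====
def Claim_equal_incr_lunlun : Prop :=
  ∀ (num : List Int), Dom_incr_lunlun num → Pre_incr_lunlun num →
    Spec_incr_lunlun num (incr_lunlun num)

-- ===== LEMMAS AND PROOFS =====

-- case-unfolding lemmas for the while loop
theorem altChain_stop (l : List Int) (i : Nat) (h : ¬ i + 1 < l.length) :
    altChain l i = (l, i) := by
  rw [altChain, dif_neg h]

theorem altChain_go (l : List Int) (i : Nat) (h : i + 1 < l.length)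
    (hv : l.getD i 0 > l.getD (i + 1) 0 + 1 ∨ l.getD i 0 = 10) :
    altChain l i = altChain (l.set (i + 1) (l.getD (i + 1) 0 + 1)) (i + 1) := by
  rw [altChain, dif_pos h, if_pos hv]

theorem altChain_noviol (l : List Int) (i : Nat) (h : i + 1 < l.length)
    (hv : ¬ (l.getD i 0 > l.getD (i + 1) 0 + 1 ∨ l.getD i 0 = 10)) :
    altChain l i = (l, i) := by
  rw [altChain, dif_pos h, if_neg hv]

-- the chain scan does not change the length of the digit list
theorem altChain_len : ∀ (n : Nat) (l : List Int) (i : Nat), l.length - i ≤ n →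
    (altChain l i).1.length = l.length := by
  intro n
  induction n with
  | zero =>
      intro l i h
      rw [altChain_stop l i (by omega)]
  | succ n ih =>
      intro l i h
      by_cases hlt : i + 1 < l.length
      · by_cases hv : l.getD i 0 > l.getD (i + 1) 0 + 1 ∨ l.getD i 0 = 10
        · rw [altChain_go l i hlt hv]
          have := ih (l.set (i + 1) (l.getD (i + 1) 0 + 1)) (i + 1)
            (by simp [List.length_set]; omega)
          simpa [List.length_set] using this
        · rw [altChain_noviol l i hlt hv]
      · rw [altChain_stop l i hlt]

-- shifting the chain scan by one position past a fixed head digit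
theorem altChain_shift (x : Int) : ∀ (n : Nat) (l : List Int) (i : Nat), l.length - i ≤ n →
    altChain (x :: l) (i + 1) = (x :: (altChain l i).1, (altChain l i).2 + 1) := by
  intro n
  induction n with
  | zero =>
      intro l i h
      rw [altChain_stop l i (by omega), altChain_stop (x :: l) (i + 1) (by simp; omega)]
  | succ n ih =>
      intro l i h
      by_cases hlt : i + 1 < l.length
      · have hlt' : i + 1 + 1 < (x :: l).length := by simp; omega
        by_cases hv : l.getD i 0 > l.getD (i + 1) 0 + 1 ∨ l.getD i 0 = 10
        · have hv' : (x :: l).getD (i + 1) 0 > (x :: l).getD (i + 1 + 1) 0 + 1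
              ∨ (x :: l).getD (i + 1) 0 = 10 := by simpa using hv
          rw [altChain_go (x :: l) (i + 1) hlt' hv', altChain_go l i hlt hv]
          have hset : (x :: l).set (i + 1 + 1) ((x :: l).getD (i + 1 + 1) 0 + 1)
              = x :: l.set (i + 1) (l.getD (i + 1) 0 + 1) := by
            simp
          rw [hset]
          exact ih (l.set (i + 1) (l.getD (i + 1) 0 + 1)) (i + 1)
            (by simp [List.length_set]; omega)
        · have hv' : ¬ ((x :: l).getD (i + 1) 0 > (x :: l).getD (i + 1 + 1) 0 + 1
              ∨ (x :: l).getD (i + 1) 0 = 10) := by simpa using hv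
          rw [altChain_noviol (x :: l) (i + 1) hlt' hv', altChain_noviol l i hlt hv]
      · rw [altChain_stop l i hlt, altChain_stop (x :: l) (i + 1) (by simp; omega)]

-- shifting the back-to-front fill by one position past a fixed head digit
theorem fillBack_shift (x : Int) : ∀ (k : Nat) (l : List Int),
    fillBack (x :: l) (k + 1)
      = max 0 ((fillBack l k).headD 0 - 1) :: fillBack l k := by
  intro k
  induction k with
  | zero =>
      intro l
      simp [fillBack]
      cases l <;> simp
  | succ m ih =>
      intro l
      have hstep : fillBack (x :: l) (m + 1 + 1)
          = fillBack ((x :: l).set (m + 1) (max 0 ((x :: l).getD (m + 1 + 1) 0 - 1))) (m + 1) := rfl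
      have hset : (x :: l).set (m + 1) (max 0 ((x :: l).getD (m + 1 + 1) 0 - 1))
          = x :: l.set m (max 0 (l.getD (m + 1) 0 - 1)) := by
        simp
      have hl : fillBack l (m + 1)
          = fillBack (l.set m (max 0 (l.getD (m + 1) 0 - 1))) m := rfl
      rw [hstep, hset, ih, ← hl]

-- shifting the finalization by one position past a fixed head digit
theorem altStep_shift (x : Int) (d : List Int) (j : Nat) (hd : d ≠ []) :
    altStep (x :: d, j + 1) = max 0 ((altStep (d, j)).headD 0 - 1) :: altStep (d, j) := by
  have hdl : 1 ≤ d.length := by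
    cases d with
    | nil => exact absurd rfl hd
    | cons _ _ => simp
  rw [altStep, altStep]
  simp only [List.length_cons, List.getD_cons_succ]
  have hcond : (j + 1 = d.length + 1 - 1 ∧ d.getD j 0 = 10)
      ↔ (j = d.length - 1 ∧ d.getD j 0 = 10) := by
    constructor
    · rintro ⟨h1, h2⟩; exact ⟨by omega, h2⟩
    · rintro ⟨h1, h2⟩; exact ⟨by omega, h2⟩
  by_cases hin : j = d.length - 1 ∧ d.getD j 0 = 10
  · rw [if_pos (hcond.mpr hin), if_pos hin]
    have hsete : (x :: d).set (j + 1) 0 ++ [1] = x :: (d.set j 0 ++ [1]) := by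
      simp
    rw [hsete, fillBack_shift]
  · rw [if_neg (fun h => hin (hcond.mp h)), if_neg hin]
    rw [fillBack_shift]

-- the finalization is the identity when the scan stopped at position 0 of a longer list
theorem altStep_zero (l : List Int) (h : ¬ (0 = l.length - 1 ∧ l.getD 0 0 = 10)) :
    altStep (l, 0) = l := by
  rw [altStep]
  simp only [if_neg h]
  rfl

-- A's recursion computes exactly B's scan-then-fill on the head-incremented list
theorem core : ∀ (l : List Int) (a : Int),
    incr_lunlun (a :: l) = altStep (altChain ((a + 1) :: l) 0) := by
  intro l
  induction l with
  | nil =>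
      intro a
      rw [incr_lunlun, altChain_stop _ _ (by simp)]
      by_cases h10 : a + 1 = 10
      · rw [if_pos h10, altStep]
        rw [if_pos (by simp [h10])]
        simp [h10, fillBack]
      · rw [if_neg h10, altStep]
        rw [if_neg (by simp [h10])]
        rfl
  | cons b t ih =>
      intro a
      rw [incr_lunlun]
      by_cases hv : a + 1 > b + 1 ∨ a + 1 = 10
      · rw [if_pos hv]
        have hv' : ((a + 1) :: b :: t).getD 0 0 > ((a + 1) :: b :: t).getD (0 + 1) 0 + 1
            ∨ ((a + 1) :: b :: t).getD 0 0 = 10 := by simpa using hv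
        rw [altChain_go _ 0 (by simp) hv']
        have hset : ((a + 1) :: b :: t).set (0 + 1) (((a + 1) :: b :: t).getD (0 + 1) 0 + 1)
            = (a + 1) :: (b + 1) :: t := by simp
        rw [hset, altChain_shift (a + 1) ((b + 1) :: t).length ((b + 1) :: t) 0 (by omega)]
        have hdne : (altChain ((b + 1) :: t) 0).1 ≠ [] := by
          have := altChain_len ((b + 1) :: t).length ((b + 1) :: t) 0 (by omega)
          intro hnil
          rw [hnil] at this
          simp at this
        rw [altStep_shift (a + 1) _ _ hdne, ih b]
      · rw [if_neg hv]
        have hv' : ¬ (((a + 1) :: b :: t).getD 0 0 > ((a + 1) :: b :: t).getD (0 + 1) 0 + 1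
            ∨ ((a + 1) :: b :: t).getD 0 0 = 10) := by simpa using hv
        rw [altChain_noviol _ 0 (by simp) hv']
        rw [altStep_zero]
        rintro ⟨h1, -⟩
        simp at h1

-- ===== VERDICT (by name: the statement is the Claim_ definition above) =====
theorem incr_lunlun_spec : Claim_equal_incr_lunlun := by
  intro num _ hpre
  unfold Spec_incr_lunlun
  match num with
  | [] => exact absurd rfl hpre
  | a :: rest =>
      cases rest with
      | nil => simp [incr_lunlun, incr_lunlun_alt]
      | cons b t => rw [core, incr_lunlun_alt]; simp
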